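-- pv_equiv track=rewrite | github.com/Nico-Oz-ops/ITS_Python | Esercizi_Vari/Settimana_02/Giorno_04/Esercizio_01.py | somma_cifre_pari
-- ===== SOURCE A (Python) =====
-- def somma_cifre_pari(n: int) -> int:
--     if n <= 0:
--         return 0
--
--     ultima_cifra = n % 10
--     resto = n // 10
--
--     if ultima_cifra % 2 == 0:
--         return ultima_cifra + somma_cifre_pari(resto)
--
--     else:
--         return somma_cifre_pari(resto)
-- ===== SOURCE B (Python) =====
-- def somma_cifre_pari(n: int) -> int:
--     total = 0
--     while n > 0:
--         d = n % 10
--         if d % 2 == 0: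
--             total += d
--         n //= 10
--     return total
-- ===== Notes on version B (the rewrite author's own statement) =====
-- stated objective: idiomatic
-- what changed: Replaced the linear recursion with an iterative while-loop with an accumulator (total), removing the guard-then-recurse structure and the call stack.
import Mathlib
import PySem

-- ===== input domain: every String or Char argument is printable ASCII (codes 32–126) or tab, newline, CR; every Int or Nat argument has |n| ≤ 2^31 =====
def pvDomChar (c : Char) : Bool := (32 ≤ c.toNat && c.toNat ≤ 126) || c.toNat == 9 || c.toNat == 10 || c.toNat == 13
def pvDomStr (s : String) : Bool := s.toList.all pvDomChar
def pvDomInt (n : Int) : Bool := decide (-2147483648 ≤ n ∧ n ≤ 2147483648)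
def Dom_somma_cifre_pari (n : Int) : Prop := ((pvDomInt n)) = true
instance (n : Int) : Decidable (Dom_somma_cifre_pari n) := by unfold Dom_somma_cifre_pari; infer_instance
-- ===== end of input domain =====

-- B replaces A's linear recursion by an iterative accumulator loop (same per-digit order); idiomatic, no speed claim beyond constant factors.
-- ===== PORT A =====
def somma_cifre_pari (n : Int) : Int :=
  if n ≤ 0 then 0
  else
    let ultima_cifra := PySem.Int.mod n 10
    let resto := PySem.Int.floordiv n 10
    if PySem.Int.mod ultima_cifra 2 = 0 then
      ultima_cifra + somma_cifre_pari resto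
    else
      somma_cifre_pari resto
termination_by n.toNat
decreasing_by
  all_goals
    simp only [PySem.Int.floordiv_eq_ediv_of_pos (by omega : (0:Int) < 10)]
    omega

-- ===== PORT B =====
-- the 'while n > 0' loop of Source B, state = (n, total)
def sommaLoopB (n total : Int) : Int :=
  if n > 0 then
    let d := PySem.Int.mod n 10
    let total' := if PySem.Int.mod d 2 = 0 then total + d else total
    sommaLoopB (PySem.Int.floordiv n 10) total'
  else total
termination_by n.toNat
decreasing_by
  simp only [PySem.Int.floordiv_eq_ediv_of_pos (by omega : (0:Int) < 10)]
  omega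

def somma_cifre_pari_alt (n : Int) : Int := sommaLoopB n 0

-- ===== PRECONDITION & SPEC =====
def Spec_somma_cifre_pari (n : Int) (out : Int) : Prop := out = somma_cifre_pari_alt n
instance (n : Int) (out : Int) : Decidable (Spec_somma_cifre_pari n out) := by unfold Spec_somma_cifre_pari; infer_instance

-- ===== CLAIM (what is proved, stated in full; the proofs are below) =====
def Claim_equal_somma_cifre_pari : Prop := ∀ (n : Int), Dom_somma_cifre_pari n → Spec_somma_cifre_pari n (somma_cifre_pari n)

-- ===== LEMMAS AND PROOFS =====

-- ===== VERDICT (by name: the statement is the Claim_ definition above) =====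
-- loop invariant: the accumulator loop computes total + A's recursive result
theorem sommaLoopB_eq (n total : Int) :
    sommaLoopB n total = total + somma_cifre_pari n := by
  induction n, total using sommaLoopB.induct with
  | case1 n total h d total' ih =>
      rw [sommaLoopB, somma_cifre_pari]
      simp only [if_pos h, if_neg (by omega : ¬ n ≤ 0)]
      simp only [d, total'] at ih ⊢
      rw [dite_eq_ite] at ih
      rw [ih]
      split_ifs <;> ring
  | case2 n total h =>
      rw [sommaLoopB, somma_cifre_pari]
      simp only [if_neg h, if_pos (by omega : n ≤ 0)]
      ring

theorem somma_cifre_pari_spec : Claim_equal_somma_cifre_pari := by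
  intro n _
  unfold Spec_somma_cifre_pari somma_cifre_pari_alt
  rw [sommaLoopB_eq]
  ring
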